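-- pv_equiv track=rewrite | github.com/InfiniteMalice/GEPA-Mindfulness-superalignment | src/mindful_trace_gepa/prompts/dual_path.py | _clause_prefix
-- ===== SOURCE A (Python) =====
-- def _clause_prefix(sentence: str, verb_start: int) -> tuple[str, int]:
--     prefix_window = sentence[:verb_start]
--     clause_offset = 0
--     for punct in ".?!\n":
--         idx = prefix_window.rfind(punct)
--         if idx != -1 and idx + 1 > clause_offset:
--             clause_offset = idx + 1
--     return prefix_window[clause_offset:], clause_offset
-- ===== SOURCE B (Python) =====
-- def _clause_prefix(sentence: str, verb_start: int) -> tuple[str, int]: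
--     prefix_window = sentence[:verb_start]
--     clause_offset = 0
--     for i in range(len(prefix_window) - 1, -1, -1):
--         if prefix_window[i] in {'.', '?', '!', '\n'}:
--             clause_offset = i + 1
--             break
--     return prefix_window[clause_offset:], clause_offset
-- ===== Notes on version B (the rewrite author's own statement) =====
-- stated objective: simpler
-- what changed: Replaces A's loop over the four punctuation characters with a whole-window rfind per character by a single reverse scan of the prefix window that stops with break at the first sentence-ending character.
import Mathlib
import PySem

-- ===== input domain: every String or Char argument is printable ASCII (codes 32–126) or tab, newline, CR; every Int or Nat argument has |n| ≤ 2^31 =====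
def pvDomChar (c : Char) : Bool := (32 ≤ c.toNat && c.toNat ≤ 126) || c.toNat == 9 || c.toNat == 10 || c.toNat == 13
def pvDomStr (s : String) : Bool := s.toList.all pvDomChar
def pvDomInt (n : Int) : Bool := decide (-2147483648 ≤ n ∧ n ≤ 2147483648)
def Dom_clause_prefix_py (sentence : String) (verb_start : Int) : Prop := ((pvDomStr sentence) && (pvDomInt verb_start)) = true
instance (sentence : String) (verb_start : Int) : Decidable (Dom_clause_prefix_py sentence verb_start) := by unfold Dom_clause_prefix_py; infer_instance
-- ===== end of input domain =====

-- B replaces A's four whole-window rfind passes by one reverse scan that stops at the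
-- first sentence-ending character found (objective: simpler, one pass instead of four).

-- ===== PORT A =====
-- A's 'for punct in ".?!\n"' loop: fold over the four punctuation characters, each
-- step doing prefix_window.rfind(punct) and keeping the larger idx+1
def pvFoldA (pw : List Char) : Int :=
  (".?!\n".toList).foldl
    (fun co p =>
      let idx := PySem.Chars.rfind pw [p]
      if idx ≠ -1 ∧ idx + 1 > co then idx + 1 else co) 0

def clause_prefix_py (sentence : String) (verb_start : Int) : String × Int :=
  let pw := PySem.List.slice sentence.toList none (some verb_start)   -- sentence[:verb_start]
  let clause_offset := pvFoldA pw
  (String.ofList (PySem.List.slice pw (some clause_offset) none), clause_offset)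

-- ===== PORT B =====
-- B's 'for i in range(len(pw)-1, -1, -1): … break' loop: structural recursion over
-- pw.reverse with n tracking i+1; the break is the non-recursive branch
def pvRevScan : List Char → Nat → Int
  | [], _ => 0
  | c :: rest, n => if c ∈ ['.', '?', '!', '\n'] then (n : Int) else pvRevScan rest (n - 1)

def clause_prefix_py_alt (sentence : String) (verb_start : Int) : String × Int :=
  let pw := PySem.List.slice sentence.toList none (some verb_start)   -- sentence[:verb_start]
  let clause_offset := pvRevScan pw.reverse pw.length
  (String.ofList (PySem.List.slice pw (some clause_offset) none), clause_offset)

-- ===== PRECONDITION & SPEC =====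
def Spec_clause_prefix_py (sentence : String) (verb_start : Int) (out : String × Int) : Prop := out = clause_prefix_py_alt sentence verb_start
instance (sentence : String) (verb_start : Int) (out : String × Int) : Decidable (Spec_clause_prefix_py sentence verb_start out) := by unfold Spec_clause_prefix_py; infer_instance

-- ===== CLAIM (what is proved, stated in full; the proofs are below) =====
def Claim_equal_clause_prefix_py : Prop := ∀ (sentence : String) (verb_start : Int), Dom_clause_prefix_py sentence verb_start → Spec_clause_prefix_py sentence verb_start (clause_prefix_py sentence verb_start)

-- ===== LEMMAS AND PROOFS =====

theorem pv_neg_one_le_go (s sub : List Char) : ∀ k, -1 ≤ PySem.Chars.rfind.go s sub k := by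
  intro k
  induction k with
  | zero => unfold PySem.Chars.rfind.go; split <;> omega
  | succ j ih => unfold PySem.Chars.rfind.go; split <;> omega

theorem pv_single_isPrefixOf_cons (p x : Char) (xs : List Char) :
    List.isPrefixOf [p] (x :: xs) = (p == x) := by
  simp [List.isPrefixOf]

theorem pv_go_le (s : List Char) (p : Char) :
    ∀ k, PySem.Chars.rfind.go s [p] k ≤ (k : Int) ∧
      (PySem.Chars.rfind.go s [p] k = (k : Int) → List.isPrefixOf [p] (s.drop k) = true) := by
  intro k
  induction k with
  | zero =>
    unfold PySem.Chars.rfind.go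
    split <;> simp_all
  | succ j ih =>
    unfold PySem.Chars.rfind.go
    split
    · constructor
      · omega
      · intro _; assumption
    · constructor
      · omega
      · intro h; exfalso; omega

theorem pv_rfind_lt (s : List Char) (p : Char) :
    PySem.Chars.rfind s [p] < (s.length : Int) := by
  have h := pv_go_le s p s.length
  unfold PySem.Chars.rfind
  rcases lt_or_eq_of_le h.1 with h1 | h1
  · exact h1
  · exfalso
    have h2 := h.2 h1
    simp at h2

theorem pv_go_append (pw : List Char) (c p : Char) :
    ∀ k, k < pw.length →
      PySem.Chars.rfind.go (pw ++ [c]) [p] k = PySem.Chars.rfind.go pw [p] k := by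
  intro k
  induction k with
  | zero =>
    intro hk
    unfold PySem.Chars.rfind.go
    cases pw with
    | nil => simp at hk
    | cons x xs => simp [pv_single_isPrefixOf_cons]
  | succ j ih =>
    intro hk
    unfold PySem.Chars.rfind.go
    have hd : (pw ++ [c]).drop (j + 1) = pw.drop (j + 1) ++ [c] := by
      rw [List.drop_append_of_le_length (by omega)]
    rw [hd]
    have hne : pw.drop (j + 1) ≠ [] := by
      intro h
      have := List.drop_eq_nil_iff.mp h
      omega
    cases hdrop : pw.drop (j + 1) with
    | nil => exact absurd hdrop hne
    | cons d ds =>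
      simp only [List.cons_append, pv_single_isPrefixOf_cons]
      split
      · rfl
      · exact ih (by omega)

theorem pv_rfind_snoc (pw : List Char) (c p : Char) :
    PySem.Chars.rfind (pw ++ [c]) [p] =
      if p = c then (pw.length : Int) else PySem.Chars.rfind pw [p] := by
  unfold PySem.Chars.rfind
  have h1 : (pw ++ [c]).drop (pw.length + 1) = [] := by
    apply List.drop_eq_nil_iff.mpr; simp
  have h2 : (pw ++ [c]).drop pw.length = [c] := by
    rw [List.drop_append_of_le_length (by omega)]
    simp
  cases pw with
  | nil =>
    simp only [List.nil_append, List.length_nil, List.length_cons]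
    unfold PySem.Chars.rfind.go
    simp only [List.drop_succ_cons, List.drop_nil, List.isPrefixOf,
      Bool.false_eq_true, if_false]
    unfold PySem.Chars.rfind.go
    simp only [pv_single_isPrefixOf_cons]
    by_cases hpc : p = c <;> simp [hpc, beq_iff_eq]
  | cons x xs =>
    simp only [List.length_cons, List.length_append, List.length_nil] at *
    simp only [List.length_cons, List.length_append, List.length_nil, Nat.zero_add]
    unfold PySem.Chars.rfind.go
    simp only [List.cons_append] at h1 h2 ⊢
    rw [h1]
    simp only [List.isPrefixOf, Bool.false_eq_true, if_false]
    unfold PySem.Chars.rfind.go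
    rw [h2, pv_single_isPrefixOf_cons]
    by_cases hpc : p = c
    · simp [hpc]
    · have : (p == c) = false := by simp [hpc]
      rw [this]
      simp only [Bool.false_eq_true, if_false, if_neg hpc]
      have hga := pv_go_append (x :: xs) c p xs.length (by simp)
      simp only [List.cons_append] at hga
      rw [hga]
      have h3 : (x :: xs).drop (xs.length + 1) = [] := by simp
      rw [h3]
      simp only [List.isPrefixOf, Bool.false_eq_true, if_false]
      conv_lhs => unfold PySem.Chars.rfind.go
      cases xs.length <;> simp [List.isPrefixOf]

theorem pv_fstep (pw : List Char) (p : Char) (co : Int) (hco : 0 ≤ co) :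
    (if PySem.Chars.rfind pw [p] ≠ -1 ∧ PySem.Chars.rfind pw [p] + 1 > co
       then PySem.Chars.rfind pw [p] + 1 else co)
      = max co (PySem.Chars.rfind pw [p] + 1) := by
  have h1 : -1 ≤ PySem.Chars.rfind.go pw [p] pw.length := pv_neg_one_le_go pw [p] pw.length
  unfold PySem.Chars.rfind at *
  split <;> rename_i h
  · omega
  · push Not at h
    by_cases h2 : PySem.Chars.rfind.go pw [p] pw.length = -1
    · rw [h2]; omega
    · have := h h2; omega

theorem pv_foldA_max (pw : List Char) :
    pvFoldA pw = max (max (max (max 0 (PySem.Chars.rfind pw ['.'] + 1))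
      (PySem.Chars.rfind pw ['?'] + 1)) (PySem.Chars.rfind pw ['!'] + 1))
      (PySem.Chars.rfind pw ['\n'] + 1) := by
  unfold pvFoldA
  have hs : ".?!\n".toList = ['.', '?', '!', '\n'] := by decide
  rw [hs]
  simp only [List.foldl]
  rw [pv_fstep pw '.' 0 le_rfl]
  rw [pv_fstep pw '?' _ (by omega)]
  rw [pv_fstep pw '!' _ (by omega)]
  rw [pv_fstep pw '\n' _ (by omega)]

theorem pv_main (pw : List Char) : pvFoldA pw = pvRevScan pw.reverse pw.length := by
  induction pw using List.reverseRecOn with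
  | nil => decide
  | append_singleton xs c ih =>
    have hrev : (xs ++ [c]).reverse = c :: xs.reverse := by simp
    have hlen : (xs ++ [c]).length = xs.length + 1 := by simp
    rw [hrev, hlen]
    have hb1 := pv_rfind_lt xs '.'
    have hb2 := pv_rfind_lt xs '?'
    have hb3 := pv_rfind_lt xs '!'
    have hb4 := pv_rfind_lt xs '\n'
    rw [pv_foldA_max] at ih ⊢
    rw [pv_rfind_snoc, pv_rfind_snoc, pv_rfind_snoc, pv_rfind_snoc]
    unfold pvRevScan
    by_cases hc : c ∈ ['.', '?', '!', '\n']
    · simp only [hc, if_pos]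
      fin_cases hc <;> simp <;> omega
    · have h1 : ('.' : Char) ≠ c := fun h => hc (by simp [← h])
      have h2 : ('?' : Char) ≠ c := fun h => hc (by simp [← h])
      have h3 : ('!' : Char) ≠ c := fun h => hc (by simp [← h])
      have h4 : ('\n' : Char) ≠ c := fun h => hc (by simp [← h])
      simp only [if_neg h1, if_neg h2, if_neg h3, if_neg h4]
      rw [if_neg (by simpa using hc)]
      simpa using ih

-- ===== VERDICT (by name: the statement is the Claim_ definition above) =====
theorem clause_prefix_py_spec : Claim_equal_clause_prefix_py := by
  intro sentence verb_start _
  unfold Spec_clause_prefix_py clause_prefix_py clause_prefix_py_alt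
  simp only [pv_main]
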